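-- pv_equiv track=rewrite | github.com/WindLX/smart_bookshelf | code/segment.py | judge_width
-- ===== SOURCE A (Python) =====
-- def judge_width(i, sorted_lines, delta_index, distance):
--     line1 = sorted_lines[i]
--     if i + delta_index < len(sorted_lines):
--         line2 = sorted_lines[i + delta_index]
--     else:
--         x1, _, x2, _ = line1
--         pt1 = (min(x1, x2), 0)
--         pt2 = (max(x1, x2), 10000)
--         return (pt1, pt2, delta_index)
--     x1, _, x2, _ = line1
--     x3, _, x4,_ = line2
--     pt1 = (min(x1, x2), 0)
--     pt2 = (max(x3, x4), 10000)
--     if pt2[0] - pt1[0] <= distance: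
--         if i + delta_index < len(sorted_lines):
--             delta_index += 1
--             return judge_width(i, sorted_lines, delta_index, distance)
--         else:
--             return (pt1, pt2, delta_index)
--     else:
--         return (pt1, pt2, delta_index)
-- ===== SOURCE B (Python) =====
-- def judge_width(i, sorted_lines, delta_index, distance):
--     x1, _, x2, _ = sorted_lines[i]
--     pt1 = (min(x1, x2), 0)
--     n = len(sorted_lines)
--     while i + delta_index < n:
--         x3, _, x4, _ = sorted_lines[i + delta_index]
--         pt2 = (max(x3, x4), 10000)
--         if pt2[0] - pt1[0] <= distance:
--             delta_index += 1
--         else: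
--             return (pt1, pt2, delta_index)
--     return (pt1, (max(x1, x2), 10000), delta_index)
-- ===== Notes on version B (the rewrite author's own statement) =====
-- stated objective: simpler
-- what changed: Replaced the tail recursion (which re-reads and re-destructures line1 and re-tests the bound on every call, and carries an unreachable else branch) by a while loop that computes pt1 from line1 once and only scans forward for line2.
import Mathlib
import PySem

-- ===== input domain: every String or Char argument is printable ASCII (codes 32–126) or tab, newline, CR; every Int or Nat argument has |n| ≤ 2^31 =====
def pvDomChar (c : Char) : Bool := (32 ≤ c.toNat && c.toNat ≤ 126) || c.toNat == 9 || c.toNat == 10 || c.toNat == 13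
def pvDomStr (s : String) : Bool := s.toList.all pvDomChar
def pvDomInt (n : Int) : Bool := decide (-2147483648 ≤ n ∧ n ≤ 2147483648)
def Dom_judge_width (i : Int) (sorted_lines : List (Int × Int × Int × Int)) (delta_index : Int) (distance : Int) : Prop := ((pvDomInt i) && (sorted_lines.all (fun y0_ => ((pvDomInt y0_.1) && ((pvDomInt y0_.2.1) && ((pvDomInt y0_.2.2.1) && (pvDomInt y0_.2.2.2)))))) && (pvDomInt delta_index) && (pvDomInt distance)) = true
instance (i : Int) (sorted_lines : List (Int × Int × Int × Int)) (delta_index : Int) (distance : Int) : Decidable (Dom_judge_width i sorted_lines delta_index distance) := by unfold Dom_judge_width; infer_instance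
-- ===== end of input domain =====

-- B replaces A's tail recursion by a while loop that computes pt1 from line1 once (simpler; drops A's unreachable inner else branch).


-- ===== PORT A =====
-- literal transliteration of A: reads line1, early return past the end, else reads line2,
-- builds pt1/pt2 and tail-recurses with delta_index+1 (keeping A's redundant inner bound test)
def judge_width (i : Int) (sorted_lines : List (Int × Int × Int × Int)) (delta_index : Int) (distance : Int) : (Int × Int) × (Int × Int) × Int :=
  match PySem.List.pyGet? sorted_lines i with
  | none => ((0, 0), (0, 0), 0)  -- Python raises IndexError here; outside Pre_
  | some line1 =>
    if i + delta_index < (sorted_lines.length : Int) then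
      match PySem.List.pyGet? sorted_lines (i + delta_index) with
      | none => ((0, 0), (0, 0), 0)  -- IndexError; outside Pre_
      | some line2 =>
        let pt1 := (min line1.1 line1.2.2.1, (0 : Int))
        let pt2 := (max line2.1 line2.2.2.1, (10000 : Int))
        if pt2.1 - pt1.1 ≤ distance then
          if i + delta_index < (sorted_lines.length : Int) then
            judge_width i sorted_lines (delta_index + 1) distance
          else
            (pt1, pt2, delta_index)
        else
          (pt1, pt2, delta_index)
    else
      let pt1 := (min line1.1 line1.2.2.1, (0 : Int))
      let pt2 := (max line1.1 line1.2.2.1, (10000 : Int))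
      (pt1, pt2, delta_index)
termination_by ((sorted_lines.length : Int) - (i + delta_index)).toNat
decreasing_by omega

-- ===== PORT B =====
-- the while loop of Source B: state is delta_index; pt1, x1, x2 are loop-invariant
def jwAltLoop (sorted_lines : List (Int × Int × Int × Int)) (i : Int) (pt1 : Int × Int) (x1 x2 : Int) (delta_index : Int) (distance : Int) : (Int × Int) × (Int × Int) × Int :=
  if i + delta_index < (sorted_lines.length : Int) then
    match PySem.List.pyGet? sorted_lines (i + delta_index) with
    | none => ((0, 0), (0, 0), 0)  -- IndexError; outside Pre_
    | some line2 =>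
      let pt2 := (max line2.1 line2.2.2.1, (10000 : Int))
      if pt2.1 - pt1.1 ≤ distance then
        jwAltLoop sorted_lines i pt1 x1 x2 (delta_index + 1) distance
      else
        (pt1, pt2, delta_index)
  else
    (pt1, (max x1 x2, 10000), delta_index)
termination_by ((sorted_lines.length : Int) - (i + delta_index)).toNat
decreasing_by omega

def judge_width_alt (i : Int) (sorted_lines : List (Int × Int × Int × Int)) (delta_index : Int) (distance : Int) : (Int × Int) × (Int × Int) × Int :=
  match PySem.List.pyGet? sorted_lines i with
  | none => ((0, 0), (0, 0), 0)  -- IndexError; outside Pre_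
  | some line1 =>
    jwAltLoop sorted_lines i (min line1.1 line1.2.2.1, 0) line1.1 line1.2.2.1 delta_index distance

-- ===== PRECONDITION & SPEC =====
-- Pre_ excludes exactly the inputs where Python A raises IndexError: i out of range for
-- sorted_lines[i], or i+delta_index below -len (then the first sorted_lines[i+delta_index] raises).
def Pre_judge_width (i : Int) (sorted_lines : List (Int × Int × Int × Int)) (delta_index : Int) (distance : Int) : Prop :=
  PySem.Raise.InRange sorted_lines.length i ∧ -(sorted_lines.length : Int) ≤ i + delta_index
instance (i : Int) (sorted_lines : List (Int × Int × Int × Int)) (delta_index : Int) (distance : Int) : Decidable (Pre_judge_width i sorted_lines delta_index distance) := by unfold Pre_judge_width; infer_instance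
def pvWitness_judge_width : Int × (List (Int × Int × Int × Int)) × Int × Int := (0, [(3, 0, 1, 0), (2, 0, 4, 0)], 1, 5)
def Spec_judge_width (i : Int) (sorted_lines : List (Int × Int × Int × Int)) (delta_index : Int) (distance : Int) (out : (Int × Int) × (Int × Int) × Int) : Prop := out = judge_width_alt i sorted_lines delta_index distance
instance (i : Int) (sorted_lines : List (Int × Int × Int × Int)) (delta_index : Int) (distance : Int) (out : (Int × Int) × (Int × Int) × Int) : Decidable (Spec_judge_width i sorted_lines delta_index distance out) := by unfold Spec_judge_width; infer_instance

-- ===== CLAIM (what is proved, stated in full; the proofs are below) =====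
def Claim_equal_judge_width : Prop := ∀ (i : Int) (sorted_lines : List (Int × Int × Int × Int)) (delta_index : Int) (distance : Int), Dom_judge_width i sorted_lines delta_index distance → Pre_judge_width i sorted_lines delta_index distance → Spec_judge_width i sorted_lines delta_index distance (judge_width i sorted_lines delta_index distance)

-- ===== LEMMAS AND PROOFS =====

-- A's recursion equals B's loop, for the line1 fetched once; induction on the distance to the end of the list.
lemma judge_width_eq_loop (sorted_lines : List (Int × Int × Int × Int)) (i : Int) (distance : Int)
    (line1 : Int × Int × Int × Int) (h1 : PySem.List.pyGet? sorted_lines i = some line1) :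
    ∀ (n : Nat) (d : Int), ((sorted_lines.length : Int) - (i + d)).toNat ≤ n →
      -(sorted_lines.length : Int) ≤ i + d →
      judge_width i sorted_lines d distance
        = jwAltLoop sorted_lines i (min line1.1 line1.2.2.1, 0) line1.1 line1.2.2.1 d distance := by
  intro n
  induction n with
  | zero =>
    intro d hn _
    have hge : (sorted_lines.length : Int) ≤ i + d := by omega
    rw [judge_width, jwAltLoop, h1]
    simp [not_lt.mpr hge]
  | succ n ih =>
    intro d hn hlo
    by_cases hlt : i + d < (sorted_lines.length : Int)
    · have hsome : PySem.List.pyGet? sorted_lines (i + d) ≠ none := by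
        intro hnone
        rw [PySem.List.pyGet?_eq_none_iff] at hnone
        exact hnone (by simp [PySem.Raise.InRange]; omega)
      obtain ⟨line2, h2⟩ := Option.ne_none_iff_exists'.mp hsome
      rw [judge_width, jwAltLoop, h1, h2]
      simp only [hlt, if_true]
      by_cases hd : max line2.1 line2.2.2.1 - min line1.1 line1.2.2.1 ≤ distance
      · simp only [hd, if_true]
        exact ih (d + 1) (by omega) (by omega)
      · simp only [hd, if_false]
    · rw [judge_width, jwAltLoop, h1]
      simp [hlt]

-- ===== VERDICT (by name: the statement is the Claim_ definition above) =====
theorem judge_width_spec : Claim_equal_judge_width := by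
  intro i sorted_lines delta_index distance _ hpre
  obtain ⟨hin, hlo⟩ := hpre
  have hsome : PySem.List.pyGet? sorted_lines i ≠ none := by
    intro hnone
    rw [PySem.List.pyGet?_eq_none_iff] at hnone
    exact hnone hin
  obtain ⟨line1, h1⟩ := Option.ne_none_iff_exists'.mp hsome
  unfold Spec_judge_width judge_width_alt
  rw [h1]
  exact judge_width_eq_loop sorted_lines i distance line1 h1
    ((sorted_lines.length : Int) - (i + delta_index)).toNat delta_index le_rfl hlo
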